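-- pv_equiv track=rewrite | github.com/b-e-p/bep | Bep/package.py | pkgs_and_branches_for_pkg_type_status
-- ===== SOURCE A (Python) =====
-- def pkgs_and_branches_for_pkg_type_status(pkgs_and_branches_installed_for_pkg_type_lang):
--     ''' tells whether branches for the packages are turned on/off '''
--
--     all_pkg_branches_with_hidden_raw = {}
--     all_pkg_branches_with_hidden_renamed = {}
--     pkg_branches_on = {} # there will be only one on at a time for each pkg_installed
--     pkg_branches_off = {}
--
--     for pkg_installed, branches in pkgs_and_branches_installed_for_pkg_type_lang.items():
--
--         all_pkg_branches_with_hidden_raw.update({pkg_installed: []})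
--         all_pkg_branches_with_hidden_renamed.update({pkg_installed: []})
--         pkg_branches_on.update({pkg_installed: []})
--         pkg_branches_off.update({pkg_installed: []})
--
--         for branch in branches:
--             all_pkg_branches_with_hidden_raw[ pkg_installed ].append(branch)
--             if not branch.startswith('.__'):    # branch is on
--                 pkg_branches_on[ pkg_installed ].append(branch)
--                 all_pkg_branches_with_hidden_renamed[ pkg_installed ].append(branch)
--
--             elif branch.startswith('.__'):      # branch is off
--                 branch_off = branch.lstrip('.__')
--                 pkg_branches_off[ pkg_installed ].append(branch_off)
--                 all_pkg_branches_with_hidden_renamed[ pkg_installed ].append(branch_off)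
--
--     pkg_branches = dict(all_pkg_branches_with_hidden_raw = all_pkg_branches_with_hidden_raw,
--                         all_pkg_branches_with_hidden_renamed = all_pkg_branches_with_hidden_renamed,
--                         pkg_branches_on = pkg_branches_on,
--                         pkg_branches_off = pkg_branches_off)
--         # { all_pkg_branches_with_hidden_raw:   {pkg_name1: [branches_on_&_off, ...], pkg_name2: [branches_on_&_off, ...]},
--         #   all_pkg_branches_with_hidden_renamed:   {pkg_name1: [branches_on_&_off, ...], pkg_name2: [branches_on_&_off, ...]},
--         #   pkg_branches_on:    {pkg_name1: [branch_on], pkg_name2: [branch_on]},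
--         #   pkg_branches_off:   {pkg_name1: [branch(es)_off, ...], pkg_name2: [branch(es)_off, ...]} }
--     return pkg_branches
-- ===== SOURCE B (Python) =====
-- def pkgs_and_branches_for_pkg_type_status(pkgs_and_branches_installed_for_pkg_type_lang):
--     ''' tells whether branches for the packages are turned on/off '''
--     # stage 1: classify every branch exactly once into a record (branch, is_off, stripped)
--     recs = {}
--     for p, bs in pkgs_and_branches_installed_for_pkg_type_lang.items():
--         recs[p] = [(b, b.startswith('.__'), b.lstrip('.__')) for b in bs]
--
--     # stage 2: each table is a pure projection of the records (no string tests here)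
--     def project(select):
--         return {p: [v for r in rs for v in select(r)] for p, rs in recs.items()}
--
--     return {
--         'all_pkg_branches_with_hidden_raw':
--             project(lambda r: [r[0]]),
--         'all_pkg_branches_with_hidden_renamed':
--             project(lambda r: [r[2]] if r[1] else [r[0]]),
--         'pkg_branches_on':
--             project(lambda r: [] if r[1] else [r[0]]),
--         'pkg_branches_off':
--             project(lambda r: [r[2]] if r[1] else []),
--     }
-- ===== Notes on version B (the rewrite author's own statement) =====
-- stated objective: alternative
-- what changed: Replaces A's single interleaved loop that mutates four dicts branch-by-branch with a two-stage pipeline: one classification pass tags each branch with a record (branch, is_off, stripped) so startswith/lstrip run once per branch, and each of the four tables is then a uniform record-projection (a flatMap with a 0-or-1-item selector) with no string operations.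
import Mathlib
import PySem

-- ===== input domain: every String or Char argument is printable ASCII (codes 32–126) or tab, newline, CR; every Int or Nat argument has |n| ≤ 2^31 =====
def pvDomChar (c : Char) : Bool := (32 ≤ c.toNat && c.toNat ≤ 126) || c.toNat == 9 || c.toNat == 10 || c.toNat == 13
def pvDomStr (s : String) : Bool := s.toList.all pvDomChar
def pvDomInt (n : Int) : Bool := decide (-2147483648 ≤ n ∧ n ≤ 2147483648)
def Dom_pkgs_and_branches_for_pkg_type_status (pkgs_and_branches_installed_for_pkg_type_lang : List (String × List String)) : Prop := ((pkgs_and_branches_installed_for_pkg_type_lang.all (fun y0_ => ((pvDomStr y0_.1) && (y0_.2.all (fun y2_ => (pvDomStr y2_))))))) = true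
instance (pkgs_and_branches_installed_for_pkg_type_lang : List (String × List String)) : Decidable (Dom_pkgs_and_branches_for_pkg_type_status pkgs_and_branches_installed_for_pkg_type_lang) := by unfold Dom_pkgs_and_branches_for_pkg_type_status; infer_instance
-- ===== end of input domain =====

-- B replaces A's interleaved four-dict loop with a two-stage pipeline: one classification pass into records (branch, is_off, stripped), then four uniform record projections; objective: alternative.


-- ===== PORT A =====
-- branch.lstrip('.__'): drop leading characters belonging to {'.', '_'} (exact; hand-ported, PySem has no left-only strip-with-chars)
def pvLstripDotUnd (s : String) : String :=
  String.ofList (s.toList.dropWhile (fun c => c == '.' || c == '_'))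

def pkgs_and_branches_for_pkg_type_status (pkgs_and_branches_installed_for_pkg_type_lang : List (String × List String)) : List (String × List (String × List String)) :=
  -- the four dicts, threaded as a 4-tuple through the loop over the input dict's items
  let st :=
    (PySem.Dict.ofList pkgs_and_branches_installed_for_pkg_type_lang).items.foldl
      (fun (st : PySem.Dict String (List String) × PySem.Dict String (List String) × PySem.Dict String (List String) × PySem.Dict String (List String)) pb =>
        pb.2.foldl
          (fun st2 branch =>
            let raw := st2.1.modify pb.1 [] (· ++ [branch])
            if !(PySem.Str.startswith branch ".__") then
              (raw, st2.2.1.modify pb.1 [] (· ++ [branch]),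
               st2.2.2.1.modify pb.1 [] (· ++ [branch]), st2.2.2.2)
            else
              let branch_off := pvLstripDotUnd branch
              (raw, st2.2.1.modify pb.1 [] (· ++ [branch_off]),
               st2.2.2.1, st2.2.2.2.modify pb.1 [] (· ++ [branch_off])))
          (st.1.insert pb.1 [], st.2.1.insert pb.1 [], st.2.2.1.insert pb.1 [], st.2.2.2.insert pb.1 []))
      (PySem.Dict.empty, PySem.Dict.empty, PySem.Dict.empty, PySem.Dict.empty)
  [("all_pkg_branches_with_hidden_raw", st.1.items),
   ("all_pkg_branches_with_hidden_renamed", st.2.1.items),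
   ("pkg_branches_on", st.2.2.1.items),
   ("pkg_branches_off", st.2.2.2.items)]

-- ===== PORT B =====
-- stage 1: classify each branch once into a record (branch, is_off, stripped)
def pvClassifyRecs (xs : List (String × List String)) : List (String × List (String × Bool × String)) :=
  (PySem.Dict.ofList xs).items.map
    (fun pb => (pb.1, pb.2.map (fun b => (b, PySem.Str.startswith b ".__", pvLstripDotUnd b))))

-- stage 2: a table is a pure projection of the records (flatMap with a 0-or-1-item selector)
def pvProject (recs : List (String × List (String × Bool × String)))
    (select : String × Bool × String → List String) : List (String × List String) :=
  recs.map (fun pr => (pr.1, pr.2.flatMap select))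

def pkgs_and_branches_for_pkg_type_status_alt (pkgs_and_branches_installed_for_pkg_type_lang : List (String × List String)) : List (String × List (String × List String)) :=
  let recs := pvClassifyRecs pkgs_and_branches_installed_for_pkg_type_lang
  [("all_pkg_branches_with_hidden_raw", pvProject recs (fun r => [r.1])),
   ("all_pkg_branches_with_hidden_renamed", pvProject recs (fun r => if r.2.1 then [r.2.2] else [r.1])),
   ("pkg_branches_on", pvProject recs (fun r => if r.2.1 then [] else [r.1])),
   ("pkg_branches_off", pvProject recs (fun r => if r.2.1 then [r.2.2] else []))]

-- ===== PRECONDITION & SPEC =====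
def Spec_pkgs_and_branches_for_pkg_type_status (pkgs_and_branches_installed_for_pkg_type_lang : List (String × List String)) (out : List (String × List (String × List String))) : Prop := out = pkgs_and_branches_for_pkg_type_status_alt pkgs_and_branches_installed_for_pkg_type_lang
instance (pkgs_and_branches_installed_for_pkg_type_lang : List (String × List String)) (out : List (String × List (String × List String))) : Decidable (Spec_pkgs_and_branches_for_pkg_type_status pkgs_and_branches_installed_for_pkg_type_lang out) := by unfold Spec_pkgs_and_branches_for_pkg_type_status; infer_instance

-- ===== CLAIM (what is proved, stated in full; the proofs are below) =====
def Claim_equal_pkgs_and_branches_for_pkg_type_status : Prop := ∀ (pkgs_and_branches_installed_for_pkg_type_lang : List (String × List String)), Dom_pkgs_and_branches_for_pkg_type_status pkgs_and_branches_installed_for_pkg_type_lang → Spec_pkgs_and_branches_for_pkg_type_status pkgs_and_branches_installed_for_pkg_type_lang (pkgs_and_branches_for_pkg_type_status pkgs_and_branches_installed_for_pkg_type_lang)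

-- ===== LEMMAS AND PROOFS =====

-- modify at a key that sits in the LAST entry and nowhere earlier appends to that entry's list
theorem pv_modify_last (pre : List (String × List String)) (k : String) (acc : List String) (v : String)
    (hk : ∀ q ∈ pre, (q.1 == k) = false) :
    (PySem.Dict.mk (pre ++ [(k, acc)])).modify k [] (· ++ [v]) = PySem.Dict.mk (pre ++ [(k, acc ++ [v])]) := by
  apply PySem.Dict.ext
  induction pre with
  | nil => simp [PySem.Dict.modify, PySem.Dict.insert, PySem.Dict.contains, PySem.Dict.getD, PySem.Dict.get?]
  | cons q pre ih =>
      have hq := hk q (by simp)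
      have hrest : ∀ q' ∈ pre, (q'.1 == k) = false := fun q' h => hk q' (by simp [h])
      have ih' := ih hrest
      simp only [PySem.Dict.modify, PySem.Dict.insert, PySem.Dict.contains, PySem.Dict.getD,
        PySem.Dict.get?, List.cons_append, List.any_cons, hq,
        Bool.false_or, List.find?_cons, List.map_cons] at ih' ⊢
      simpa [hq] using ih'

-- A's 4-tuple branch loop decomposed: each component behaves as an independent append loop
theorem pv_inner4 (bs : List String) (k : String)
    (pr pn po pf : List (String × List String)) (ar an ao af : List String)
    (hr : ∀ q ∈ pr, (q.1 == k) = false) (hn : ∀ q ∈ pn, (q.1 == k) = false)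
    (ho : ∀ q ∈ po, (q.1 == k) = false) (hf : ∀ q ∈ pf, (q.1 == k) = false) :
    bs.foldl
      (fun (st2 : PySem.Dict String (List String) × PySem.Dict String (List String) × PySem.Dict String (List String) × PySem.Dict String (List String)) branch =>
        let raw := st2.1.modify k [] (· ++ [branch])
        if !(PySem.Str.startswith branch ".__") then
          (raw, st2.2.1.modify k [] (· ++ [branch]),
           st2.2.2.1.modify k [] (· ++ [branch]), st2.2.2.2)
        else
          let branch_off := pvLstripDotUnd branch
          (raw, st2.2.1.modify k [] (· ++ [branch_off]),
           st2.2.2.1, st2.2.2.2.modify k [] (· ++ [branch_off])))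
      (PySem.Dict.mk (pr ++ [(k, ar)]), PySem.Dict.mk (pn ++ [(k, an)]),
       PySem.Dict.mk (po ++ [(k, ao)]), PySem.Dict.mk (pf ++ [(k, af)]))
    = (PySem.Dict.mk (pr ++ [(k, ar ++ bs)]),
       PySem.Dict.mk (pn ++ [(k, an ++ bs.map (fun b => if PySem.Str.startswith b ".__" then pvLstripDotUnd b else b))]),
       PySem.Dict.mk (po ++ [(k, ao ++ bs.filter (fun b => !PySem.Str.startswith b ".__"))]),
       PySem.Dict.mk (pf ++ [(k, af ++ ((bs.filter (fun b => PySem.Str.startswith b ".__")).map pvLstripDotUnd))])) := by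
  induction bs generalizing ar an ao af with
  | nil => simp
  | cons b bs ih =>
      rw [List.foldl_cons]
      cases hb : PySem.Str.startswith b ".__" with
      | false =>
          simp only [Bool.not_false, if_pos,
            pv_modify_last pr k ar b hr, pv_modify_last pn k an b hn,
            pv_modify_last po k ao b ho]
          rw [ih (ar ++ [b]) (an ++ [b]) (ao ++ [b]) af]
          simp only [List.filter_cons, List.map_cons, hb, Bool.not_false,
            List.append_assoc, List.singleton_append, Bool.false_eq_true,
            if_false, if_true]
      | true =>
          simp only [Bool.not_true, Bool.false_eq_true, if_neg, not_false_eq_true,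
            pv_modify_last pr k ar b hr, pv_modify_last pn k an (pvLstripDotUnd b) hn,
            pv_modify_last pf k af (pvLstripDotUnd b) hf]
          rw [ih (ar ++ [b]) (an ++ [pvLstripDotUnd b]) ao (af ++ [pvLstripDotUnd b])]
          simp only [List.filter_cons, List.map_cons, hb, Bool.not_true,
            List.append_assoc, List.singleton_append, Bool.false_eq_true,
            if_false, if_true]

-- inserting a fresh key appends an entry
theorem pv_insert_fresh (pre : List (String × List String)) (k : String)
    (h : ∀ q ∈ pre, (q.1 == k) = false) :
    (PySem.Dict.mk pre).insert k ([] : List String) = PySem.Dict.mk (pre ++ [(k, [])]) := by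
  apply PySem.Dict.ext
  rw [PySem.Dict.items_insert_of_not_contains]
  simp only [PySem.Dict.contains, List.any_eq_false]
  intro q hq
  simp [h q hq]

-- the outer loop over the items list with Nodup keys
theorem pv_outer (l : List (String × List String))
    (pr pn po pf : List (String × List String))
    (hfr : ∀ p ∈ l, ∀ q ∈ pr, (q.1 == p.1) = false)
    (hfn : ∀ p ∈ l, ∀ q ∈ pn, (q.1 == p.1) = false)
    (hfo : ∀ p ∈ l, ∀ q ∈ po, (q.1 == p.1) = false)
    (hff : ∀ p ∈ l, ∀ q ∈ pf, (q.1 == p.1) = false)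
    (hnd : (l.map (·.1)).Nodup) :
    l.foldl
      (fun (st : PySem.Dict String (List String) × PySem.Dict String (List String) × PySem.Dict String (List String) × PySem.Dict String (List String)) pb =>
        pb.2.foldl
          (fun st2 branch =>
            let raw := st2.1.modify pb.1 [] (· ++ [branch])
            if !(PySem.Str.startswith branch ".__") then
              (raw, st2.2.1.modify pb.1 [] (· ++ [branch]),
               st2.2.2.1.modify pb.1 [] (· ++ [branch]), st2.2.2.2)
            else
              let branch_off := pvLstripDotUnd branch
              (raw, st2.2.1.modify pb.1 [] (· ++ [branch_off]),
               st2.2.2.1, st2.2.2.2.modify pb.1 [] (· ++ [branch_off])))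
          (st.1.insert pb.1 [], st.2.1.insert pb.1 [], st.2.2.1.insert pb.1 [], st.2.2.2.insert pb.1 []))
      (PySem.Dict.mk pr, PySem.Dict.mk pn, PySem.Dict.mk po, PySem.Dict.mk pf)
    = (PySem.Dict.mk (pr ++ l.map (fun pb => (pb.1, pb.2))),
       PySem.Dict.mk (pn ++ l.map (fun pb => (pb.1, pb.2.map (fun b => if PySem.Str.startswith b ".__" then pvLstripDotUnd b else b)))),
       PySem.Dict.mk (po ++ l.map (fun pb => (pb.1, pb.2.filter (fun b => !PySem.Str.startswith b ".__")))),
       PySem.Dict.mk (pf ++ l.map (fun pb => (pb.1, (pb.2.filter (fun b => PySem.Str.startswith b ".__")).map pvLstripDotUnd)))) := by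
  induction l generalizing pr pn po pf with
  | nil => simp
  | cons p l ih =>
      rw [List.foldl_cons]
      have hmem : p ∈ p :: l := by simp
      rw [pv_insert_fresh pr p.1 (hfr p hmem), pv_insert_fresh pn p.1 (hfn p hmem),
        pv_insert_fresh po p.1 (hfo p hmem), pv_insert_fresh pf p.1 (hff p hmem)]
      rw [List.map_cons] at hnd
      obtain ⟨hpnotin, hndl⟩ := List.nodup_cons.mp hnd
      have hfresh : ∀ p' ∈ l, (p.1 == p'.1) = false := by
        intro p' hp'
        have : p.1 ≠ p'.1 := fun h => hpnotin (h ▸ List.mem_map_of_mem hp')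
        simpa using this
      have step : ∀ (pre : List (String × List String)) (x : List String),
          (∀ p' ∈ p :: l, ∀ q ∈ pre, (q.1 == p'.1) = false) →
          ∀ p' ∈ l, ∀ q ∈ pre ++ [(p.1, x)], (q.1 == p'.1) = false := by
        intro pre x hpre p' hp' q hq
        rcases List.mem_append.mp hq with h | h
        · exact hpre p' (by simp [hp']) q h
        · simp only [List.mem_singleton] at h
          subst h
          exact hfresh p' hp'
      rw [pv_inner4 p.2 p.1 pr pn po pf [] [] [] []
        (hfr p hmem) (hfn p hmem) (hfo p hmem) (hff p hmem)]
      rw [ih (pr ++ [(p.1, [] ++ p.2)])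
          (pn ++ [(p.1, [] ++ p.2.map (fun b => if PySem.Str.startswith b ".__" then pvLstripDotUnd b else b))])
          (po ++ [(p.1, [] ++ p.2.filter (fun b => !PySem.Str.startswith b ".__"))])
          (pf ++ [(p.1, [] ++ (p.2.filter (fun b => PySem.Str.startswith b ".__")).map pvLstripDotUnd)])
          (step pr _ hfr) (step pn _ hfn) (step po _ hfo) (step pf _ hff) hndl]
      simp

-- B's record projections collapse to A's per-list map/filter characterisations
theorem pv_proj_raw (bs : List String) :
    (bs.map (fun b => (b, PySem.Str.startswith b ".__", pvLstripDotUnd b))).flatMap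
      (fun r => [r.1]) = bs := by
  induction bs with
  | nil => rfl
  | cons b bs ih =>
      simp only [List.map_cons, List.flatMap_cons, List.singleton_append, ih]

theorem pv_proj_renamed (bs : List String) :
    (bs.map (fun b => (b, PySem.Str.startswith b ".__", pvLstripDotUnd b))).flatMap
      (fun r => if r.2.1 then [r.2.2] else [r.1])
    = bs.map (fun b => if PySem.Str.startswith b ".__" then pvLstripDotUnd b else b) := by
  induction bs with
  | nil => rfl
  | cons b bs ih =>
      cases hb : PySem.Str.startswith b ".__" <;>
        simp only [List.map_cons, List.flatMap_cons, hb, Bool.false_eq_true, if_false, if_true,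
          List.singleton_append, ih]

theorem pv_proj_on (bs : List String) :
    (bs.map (fun b => (b, PySem.Str.startswith b ".__", pvLstripDotUnd b))).flatMap
      (fun r => if r.2.1 then [] else [r.1])
    = bs.filter (fun b => !PySem.Str.startswith b ".__") := by
  induction bs with
  | nil => rfl
  | cons b bs ih =>
      cases hb : PySem.Str.startswith b ".__" <;>
        simp only [List.map_cons, List.flatMap_cons, List.filter_cons, hb, Bool.false_eq_true,
          Bool.not_false, Bool.not_true, if_false, if_true, List.singleton_append,
          List.nil_append, ih]

theorem pv_proj_off (bs : List String) :
    (bs.map (fun b => (b, PySem.Str.startswith b ".__", pvLstripDotUnd b))).flatMap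
      (fun r => if r.2.1 then [r.2.2] else [])
    = (bs.filter (fun b => PySem.Str.startswith b ".__")).map pvLstripDotUnd := by
  induction bs with
  | nil => rfl
  | cons b bs ih =>
      cases hb : PySem.Str.startswith b ".__" <;>
        simp only [List.map_cons, List.flatMap_cons, List.filter_cons, hb, Bool.false_eq_true,
          Bool.not_false, Bool.not_true, if_false, if_true, List.singleton_append,
          List.nil_append, ih]

-- ===== VERDICT (by name: the statement is the Claim_ definition above) =====
theorem pkgs_and_branches_for_pkg_type_status_spec : Claim_equal_pkgs_and_branches_for_pkg_type_status := by
  intro xs _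
  unfold Spec_pkgs_and_branches_for_pkg_type_status
  unfold pkgs_and_branches_for_pkg_type_status pkgs_and_branches_for_pkg_type_status_alt
  have hnd : (((PySem.Dict.ofList xs).items.map (·.1)).Nodup) := by
    have := PySem.Dict.nodup_keys_ofList xs
    simpa [PySem.Dict.keys] using this
  have hempty : (PySem.Dict.empty : PySem.Dict String (List String)) = PySem.Dict.mk [] := rfl
  simp only [hempty]
  rw [pv_outer ((PySem.Dict.ofList xs).items) [] [] [] []
    (by simp) (by simp) (by simp) (by simp) hnd]
  simp only [pvClassifyRecs, pvProject, List.map_map, List.nil_append]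
  have hfun1 : ((fun pr : String × List (String × Bool × String) => (pr.1, pr.2.flatMap (fun r => [r.1]))) ∘
      (fun pb : String × List String => (pb.1, pb.2.map (fun b => (b, PySem.Str.startswith b ".__", pvLstripDotUnd b)))))
      = (fun pb : String × List String => (pb.1, pb.2)) := by
    funext pb
    simp only [Function.comp_apply]
    exact congrArg (Prod.mk pb.1) (pv_proj_raw pb.2)
  have hfun2 : ((fun pr : String × List (String × Bool × String) => (pr.1, pr.2.flatMap (fun r => if r.2.1 then [r.2.2] else [r.1]))) ∘
      (fun pb : String × List String => (pb.1, pb.2.map (fun b => (b, PySem.Str.startswith b ".__", pvLstripDotUnd b)))))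
      = (fun pb : String × List String => (pb.1, pb.2.map (fun b => if PySem.Str.startswith b ".__" then pvLstripDotUnd b else b))) := by
    funext pb
    simp only [Function.comp_apply]
    exact congrArg (Prod.mk pb.1) (pv_proj_renamed pb.2)
  have hfun3 : ((fun pr : String × List (String × Bool × String) => (pr.1, pr.2.flatMap (fun r => if r.2.1 then [] else [r.1]))) ∘
      (fun pb : String × List String => (pb.1, pb.2.map (fun b => (b, PySem.Str.startswith b ".__", pvLstripDotUnd b)))))
      = (fun pb : String × List String => (pb.1, pb.2.filter (fun b => !PySem.Str.startswith b ".__"))) := by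
    funext pb
    simp only [Function.comp_apply]
    exact congrArg (Prod.mk pb.1) (pv_proj_on pb.2)
  have hfun4 : ((fun pr : String × List (String × Bool × String) => (pr.1, pr.2.flatMap (fun r => if r.2.1 then [r.2.2] else []))) ∘
      (fun pb : String × List String => (pb.1, pb.2.map (fun b => (b, PySem.Str.startswith b ".__", pvLstripDotUnd b)))))
      = (fun pb : String × List String => (pb.1, (pb.2.filter (fun b => PySem.Str.startswith b ".__")).map pvLstripDotUnd)) := by
    funext pb
    simp only [Function.comp_apply]
    exact congrArg (Prod.mk pb.1) (pv_proj_off pb.2)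
  rw [hfun1, hfun2, hfun3, hfun4]
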